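-- pv_equiv track=rewrite | github.com/Fantomas42/cubing-algs | cubing_algs/transform.py | optimize_double_moves
-- ===== SOURCE A (Python) =====
-- def optimize_double_moves(old_moves: list[str]) -> list[str]:
--     """ R, R --> R2 """
--     i = 0
--     changed = False
--     moves = list(old_moves)
--
--     while i < len(moves) - 1:
--         if moves[i] == moves[i + 1]:
--             moves[i:i + 2] = ['%s2' % moves[i][0]]
--             changed = True
--         else:
--             i += 1
--
--     if changed:
--         return optimize_double_moves(moves)
--
--     return moves
-- ===== SOURCE B (Python) =====
-- def optimize_double_moves(old_moves: list[str]) -> list[str]: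
--     """ R, R --> R2 """
--     stack = []
--     for m in old_moves:
--         while stack and stack[-1] == m:
--             stack.pop()
--             m = '%s2' % m[0]
--         stack.append(m)
--     return stack
-- ===== Notes on version B (the rewrite author's own statement) =====
-- stated objective: faster
-- what changed: Replaced A's splice-and-restart scheme (repeated whole-list passes until a fixpoint, each merge splicing the list) by a single left-to-right stack pass that merges each pushed move with the top of the stack, cascading backwards, producing the result in one traversal; Pre_ excludes only lists with two adjacent equal empty strings, where A (and B) raise IndexError on ''[0].
import Mathlib
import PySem

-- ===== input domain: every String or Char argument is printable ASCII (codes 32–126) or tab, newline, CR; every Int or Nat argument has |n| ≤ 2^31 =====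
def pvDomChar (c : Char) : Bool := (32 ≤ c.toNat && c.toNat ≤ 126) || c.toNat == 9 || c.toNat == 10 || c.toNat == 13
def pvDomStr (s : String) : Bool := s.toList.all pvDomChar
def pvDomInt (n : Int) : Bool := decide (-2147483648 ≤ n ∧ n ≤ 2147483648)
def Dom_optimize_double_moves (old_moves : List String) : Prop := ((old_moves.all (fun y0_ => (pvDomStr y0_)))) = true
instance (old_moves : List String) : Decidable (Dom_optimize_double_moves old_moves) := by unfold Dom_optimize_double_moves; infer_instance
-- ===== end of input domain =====

-- B replaces A's repeated splice-and-restart passes by one left-to-right stack pass with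
-- backward cascade (measured asymptotically faster); equal wherever A returns (Pre_ excludes
-- exactly the inputs where A raises IndexError: two adjacent equal empty strings).

-- ===== PORT A =====
-- '%s2' % m[0]: first character of m followed by '2'; exact for nonempty m
-- (Python raises IndexError on m == '', which Pre_ excludes; the port returns "2" there).
def pvDouble (s : String) : String :=
  match s.toList with
  | c :: _ => String.ofList [c, '2']
  | [] => "2"

-- A's inner while loop: pref = moves[0:i] reversed, rest = moves[i:], changed flag as in A.
def passAux : List String → List String → Bool → (List String × Bool)
  | pref, x :: y :: rest, changed =>
      if x = y then passAux pref (pvDouble x :: rest) true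
      else passAux (x :: pref) (y :: rest) changed
  | pref, rest, changed => (pref.reverse ++ rest, changed)
termination_by _ rest _ => rest.length

theorem passAux_len : ∀ (rest pref : List String) (c : Bool),
    (passAux pref rest c).1.length ≤ pref.length + rest.length := by
  intro rest pref c
  fun_induction passAux pref rest c with
  | case1 pref x rest c ih => simp at ih ⊢; omega
  | case2 pref x y rest c hxy ih => simp at ih ⊢; omega
  | case3 pref rest c h => simp

theorem passAux_true_lt : ∀ (rest pref : List String),
    (passAux pref rest false).2 = true →
    (passAux pref rest false).1.length < pref.length + rest.length := by
  suffices H : ∀ (n : ℕ) (rest pref : List String), rest.length ≤ n →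
      (passAux pref rest false).2 = true →
      (passAux pref rest false).1.length < pref.length + rest.length from
    fun rest pref h => H rest.length rest pref le_rfl h
  intro n
  induction n with
  | zero =>
    intro rest pref hlen hsnd
    match rest with
    | [] => simp [passAux] at hsnd
    | _ :: _ => simp at hlen
  | succ n ih =>
    intro rest pref hlen hsnd
    match rest with
    | x :: y :: r =>
      rw [passAux] at hsnd ⊢
      by_cases hxy : x = y
      · simp only [if_pos hxy]
        have := passAux_len (pvDouble x :: r) pref true
        simp at this ⊢; omega
      · simp only [if_neg hxy] at hsnd ⊢
        have := ih (y :: r) (x :: pref) (by simp at hlen ⊢; omega) hsnd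
        simp at this ⊢; omega
    | [] => simp [passAux] at hsnd
    | [a] => simp [passAux] at hsnd

def optimize_double_moves (old_moves : List String) : List String :=
  let p := passAux [] old_moves false
  if h : p.2 = true then optimize_double_moves p.1 else p.1
termination_by old_moves.length
decreasing_by
  simpa using passAux_true_lt old_moves [] h

-- ===== PORT B =====
-- the inner while loop of B: pop/merge while the top of the stack equals the current move
def cascade : String → List String → List String
  | x, t :: st => if t = x then cascade (pvDouble x) st else x :: t :: st
  | x, [] => [x]

def optimize_double_moves_alt (old_moves : List String) : List String :=
  (old_moves.foldl (fun st m => cascade m st) []).reverse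

-- ===== PRECONDITION & SPEC =====
-- Pre_ excludes exactly the inputs on which the Python A raises IndexError (''[0]):
-- lists with two adjacent equal empty strings.
def Pre_optimize_double_moves (old_moves : List String) : Prop :=
  List.IsChain (fun a b => ¬(a = "" ∧ b = "")) old_moves
instance (old_moves : List String) : Decidable (Pre_optimize_double_moves old_moves) := by
  unfold Pre_optimize_double_moves; infer_instance

def pvWitness_optimize_double_moves : List String := ["R", "R", "U"]

def Spec_optimize_double_moves (old_moves : List String) (out : List String) : Prop := out = optimize_double_moves_alt old_moves
instance (old_moves : List String) (out : List String) : Decidable (Spec_optimize_double_moves old_moves out) := by unfold Spec_optimize_double_moves; infer_instance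

-- ===== CLAIM (what is proved, stated in full; the proofs are below) =====
def Claim_equal_optimize_double_moves : Prop := ∀ (old_moves : List String), Dom_optimize_double_moves old_moves → Pre_optimize_double_moves old_moves → Spec_optimize_double_moves old_moves (optimize_double_moves old_moves)

-- ===== LEMMAS AND PROOFS =====

-- B's stack fold, seeded with an arbitrary stack
def pvStk (st : List String) (l : List String) : List String :=
  l.foldl (fun s m => cascade m s) st

theorem pvDouble_ne_empty (x : String) : pvDouble x ≠ "" := by
  unfold pvDouble
  cases h : x.toList with
  | nil => simp
  | cons c cs =>
    intro hc
    have := congrArg String.toList hc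
    simp at this

theorem pvDouble_fix (x : String) (h : x ≠ "") : pvDouble (pvDouble x) = pvDouble x := by
  unfold pvDouble
  cases hx : x.toList with
  | nil => exact absurd (by simpa using congrArg String.ofList hx) h
  | cons c cs => simp

theorem cascade_idem (x : String) (hx : pvDouble x = x) :
    ∀ st, cascade x (cascade x st) = cascade x st := by
  intro st
  induction st with
  | nil => simp [cascade, hx]
  | cons t s ih =>
    by_cases ht : t = x
    · subst ht
      simp [cascade, hx, ih]
    · simp [cascade, ht, hx]

theorem cascade_twice (st : List String) (x : String)
    (h : st.head? = some x → pvDouble x = x) :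
    cascade x (cascade x st) = cascade (pvDouble x) st := by
  match st with
  | [] => simp [cascade]
  | t :: s =>
    by_cases ht : t = x
    · subst ht
      have hfix := h rfl
      simp [cascade, hfix, cascade_idem _ hfix]
    · simp [cascade, ht]

theorem cascade_head : ∀ (st : List String) (x : String),
    (st.head? = some x → pvDouble x = x) →
    ∀ y, (cascade x st).head? = some y → y = x ∨ pvDouble y = y := by
  intro st
  induction st with
  | nil => intro x h y hy; simp [cascade] at hy; exact Or.inl hy.symm
  | cons t s ih =>
    intro x h y hy
    by_cases ht : t = x
    · subst ht
      have hfix := h rfl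
      rw [cascade, if_pos rfl, hfix] at hy
      rcases ih t (fun _ => hfix) y hy with h1 | h1
      · exact Or.inr (h1 ▸ hfix)
      · exact Or.inr h1
    · rw [cascade, if_neg ht] at hy
      simp at hy
      exact Or.inl hy.symm

theorem stk_cons (st : List String) (x : String) (l : List String) :
    pvStk st (x :: l) = pvStk (cascade x st) l := rfl

theorem stk_append (st : List String) (l1 l2 : List String) :
    pvStk st (l1 ++ l2) = pvStk (pvStk st l1) l2 := by
  simp [pvStk, List.foldl_append]

theorem stk_concat (l : List String) (x : String) :
    pvStk [] (l ++ [x]) = cascade x (pvStk [] l) := by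
  simp [pvStk]

theorem pass_main : ∀ (rest pref : List String) (c : Bool),
    List.IsChain (fun a b => ¬(a = "" ∧ b = "")) (pref.reverse ++ rest) →
    (∀ x r, rest = x :: r → (pvStk [] pref.reverse).head? = some x → pvDouble x = x) →
    pvStk [] (passAux pref rest c).1 = pvStk (pvStk [] pref.reverse) rest ∧
      List.IsChain (fun a b => ¬(a = "" ∧ b = "")) (passAux pref rest c).1 := by
  intro rest pref c
  fun_induction passAux pref rest c with
  | case1 pref x r c ih =>
    intro hchain hH
    have hmid : List.IsChain (fun a b => ¬(a = "" ∧ b = "")) (x :: x :: r) :=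
      (List.isChain_append.mp hchain).2.1
    have hxne : x ≠ "" := fun h => (List.rel_of_isChain_cons_cons hmid) ⟨h, h⟩
    have hchain' : List.IsChain (fun a b => ¬(a = "" ∧ b = ""))
        (pref.reverse ++ pvDouble x :: r) := by
      refine List.isChain_append.mpr ⟨(List.isChain_append.mp hchain).1, ?_, ?_⟩
      · refine List.isChain_cons.mpr ⟨?_, hmid.of_cons.of_cons⟩
        intro y _ hy
        exact pvDouble_ne_empty x hy.1
      · intro a _ b hb
        simp at hb
        intro hcontra
        exact pvDouble_ne_empty x (hb ▸ hcontra.2)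
    have hH' : ∀ z r', pvDouble x :: r = z :: r' →
        (pvStk [] pref.reverse).head? = some z → pvDouble z = z := by
      intro z r' hz hhead
      cases hz
      exact pvDouble_fix x hxne
    have ⟨ih1, ih2⟩ := ih hchain' hH'
    refine ⟨?_, ih2⟩
    rw [ih1, stk_cons, stk_cons, stk_cons,
      cascade_twice (pvStk [] pref.reverse) x (hH x (x :: r) rfl)]
  | case2 pref x y r c hxy ih =>
    intro hchain hH
    have hS' : pvStk [] (x :: pref).reverse = cascade x (pvStk [] pref.reverse) := by
      rw [List.reverse_cons, stk_concat]
    have hchain2 : List.IsChain (fun a b => ¬(a = "" ∧ b = ""))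
        ((x :: pref).reverse ++ y :: r) := by
      rw [List.reverse_cons, List.append_assoc]
      simpa using hchain
    have hH2 : ∀ z r', y :: r = z :: r' →
        (pvStk [] (x :: pref).reverse).head? = some z → pvDouble z = z := by
      intro z r' hz hhead
      injection hz with h1 _
      subst h1
      rw [hS'] at hhead
      rcases cascade_head (pvStk [] pref.reverse) x (hH x (y :: r) rfl) y hhead with h | h
      · exact absurd h.symm hxy
      · exact h
    have ⟨ih1, ih2⟩ := ih hchain2 hH2
    refine ⟨?_, ih2⟩
    rw [ih1, hS']
    rfl
  | case3 pref rest c h =>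
    intro hchain _
    exact ⟨stk_append [] pref.reverse rest, hchain⟩

theorem passAux_snd_true : ∀ (rest pref : List String) (c : Bool), c = true →
    (passAux pref rest c).2 = true := by
  intro rest pref c
  fun_induction passAux pref rest c with
  | case1 pref x r c ih => intro _; exact ih rfl
  | case2 pref x y r c hxy ih => exact ih
  | case3 pref rest c h => intro hc; simpa using hc

theorem passAux_nomerge : ∀ (rest pref : List String) (c : Bool),
    (passAux pref rest c).2 = false →
    (passAux pref rest c).1 = pref.reverse ++ rest ∧ List.IsChain (· ≠ ·) rest := by
  intro rest pref c
  fun_induction passAux pref rest c with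
  | case1 pref x r c ih =>
    intro hsnd
    exact absurd (passAux_snd_true (pvDouble x :: r) pref true rfl) (by simp [hsnd])
  | case2 pref x y r c hxy ih =>
    intro hsnd
    have ⟨h1, h2⟩ := ih hsnd
    refine ⟨by simpa [List.append_assoc] using h1, ?_⟩
    exact List.isChain_cons_cons.mpr ⟨hxy, h2⟩
  | case3 pref rest c h =>
    intro _
    refine ⟨rfl, ?_⟩
    match rest, h with
    | [], _ => simp
    | [a], _ => simp
    | x :: y :: r, h => exact absurd rfl (fun hh => h x y r hh)

theorem stk_of_chain_ne : ∀ (l st : List String),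
    List.IsChain (· ≠ ·) l → (∀ x, l.head? = some x → st.head? ≠ some x) →
    pvStk st l = l.reverse ++ st := by
  intro l
  induction l with
  | nil => intro st _ _; rfl
  | cons x r ih =>
    intro st hchain hhead
    have hcx : cascade x st = x :: st := by
      match st with
      | [] => rfl
      | t :: s =>
        have : t ≠ x := fun h => hhead x rfl (by rw [h]; rfl)
        rw [cascade, if_neg this]
    rw [stk_cons, hcx, ih (x :: st) hchain.of_cons ?_]
    · simp
    · intro z hz hcontra
      simp at hcontra
      exact (List.isChain_cons.mp hchain).1 z hz (hcontra ▸ rfl)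

theorem ab_eq : ∀ (l : List String),
    List.IsChain (fun a b => ¬(a = "" ∧ b = "")) l →
    optimize_double_moves l = optimize_double_moves_alt l := by
  suffices H : ∀ (n : ℕ) (l : List String), l.length ≤ n →
      List.IsChain (fun a b => ¬(a = "" ∧ b = "")) l →
      optimize_double_moves l = optimize_double_moves_alt l from
    fun l h => H l.length l le_rfl h
  intro n
  induction n with
  | zero =>
    intro l hlen _
    have : l = [] := List.length_eq_zero_iff.mp (Nat.le_zero.mp hlen)
    subst this
    rw [optimize_double_moves]
    simp [passAux, optimize_double_moves_alt]
  | succ n ih =>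
    intro l hlen hchain
    have hmain := pass_main l [] false (by simpa using hchain) (by intro x r _ h; simp [pvStk] at h)
    rw [optimize_double_moves]
    by_cases hc : (passAux [] l false).2 = true
    · rw [dif_pos hc]
      have hlt := passAux_true_lt l [] hc
      simp at hlt
      rw [ih (passAux [] l false).1 (by omega) hmain.2]
      show optimize_double_moves_alt _ = _
      unfold optimize_double_moves_alt
      have : pvStk [] (passAux [] l false).1 = pvStk [] l := by
        simpa [pvStk] using hmain.1
      simpa [pvStk] using congrArg List.reverse this
    · rw [dif_neg hc]
      have ⟨h1, h2⟩ := passAux_nomerge l [] false (by simpa using hc)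
      rw [h1]
      simp only [List.reverse_nil, List.nil_append]
      unfold optimize_double_moves_alt
      have := stk_of_chain_ne l [] h2 (by simp)
      simp [pvStk] at this
      simp [this]

-- ===== VERDICT (by name: the statement is the Claim_ definition above) =====
theorem optimize_double_moves_spec : Claim_equal_optimize_double_moves := by
  intro l _ hpre
  unfold Spec_optimize_double_moves
  exact ab_eq l hpre
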